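-- pv_equiv track=rewrite | github.com/hashTB/providerView | tf_provider_scanner.py | detect_cohort
-- ===== SOURCE A (Python) =====
-- def detect_cohort(protocols: list[str]) -> tuple[bool, bool, bool]:
--     """
--     Detect the SDK/Framework cohort based on protocols.
--
--     Protocol mapping:
--     - v4: Usually older SDK v1
--     - v5: SDK v2 or Framework (both support v5)
--     - v6: Framework (terraform-plugin-framework)
--
--     Returns: (framework_only, sdkv2_only, framework_sdkv2)
--     """
--     has_v4 = any('4' in p for p in protocols)
--     has_v5 = any('5' in p for p in protocols)
--     has_v6 = any('6' in p for p in protocols)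
--
--     # Protocol v6 is a strong indicator of terraform-plugin-framework
--     # Protocol v5 alone usually means SDK v2
--     # Some providers support both v5 and v6 (mixed Framework + SDK v2)
--
--     framework_only = has_v6 and not has_v5 and not has_v4
--     sdkv2_only = (has_v5 or has_v4) and not has_v6
--     framework_sdkv2 = has_v6 and (has_v5 or has_v4)
--
--     return framework_only, sdkv2_only, framework_sdkv2
-- ===== SOURCE B (Python) =====
-- def detect_cohort(protocols: list[str]) -> tuple[bool, bool, bool]:
--     has_v4 = has_v5 = has_v6 = False
--     for p in protocols:
--         if '4' in p:
--             has_v4 = True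
--         if '5' in p:
--             has_v5 = True
--         if '6' in p:
--             has_v6 = True
--         if has_v4 and has_v5 and has_v6:
--             break
--     framework_only = has_v6 and not has_v5 and not has_v4
--     sdkv2_only = (has_v5 or has_v4) and not has_v6
--     framework_sdkv2 = has_v6 and (has_v5 or has_v4)
--     return framework_only, sdkv2_only, framework_sdkv2
-- ===== Notes on version B (the rewrite author's own statement) =====
-- stated objective: alternative
-- what changed: Replaces three independent any() scans of the list with a single fused loop that accumulates the v4/v5/v6 flags and breaks early once all three are set, then applies the same boolean combination.
import Mathlib
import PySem

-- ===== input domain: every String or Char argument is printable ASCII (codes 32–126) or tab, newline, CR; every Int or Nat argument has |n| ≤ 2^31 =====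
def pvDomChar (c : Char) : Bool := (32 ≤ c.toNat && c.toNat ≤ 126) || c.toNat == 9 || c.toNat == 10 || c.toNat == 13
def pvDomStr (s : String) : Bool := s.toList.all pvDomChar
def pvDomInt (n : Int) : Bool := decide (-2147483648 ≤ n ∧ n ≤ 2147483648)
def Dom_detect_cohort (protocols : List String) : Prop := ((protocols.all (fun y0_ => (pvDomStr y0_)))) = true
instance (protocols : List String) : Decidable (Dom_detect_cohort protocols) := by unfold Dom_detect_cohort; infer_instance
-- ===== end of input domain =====

-- ===== PORT A =====
-- A: three independent any() scans, then the boolean combination.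
def detect_cohort (protocols : List String) : Bool × Bool × Bool :=
  let has_v4 := protocols.any (fun p => PySem.Str.isIn "4" p)
  let has_v5 := protocols.any (fun p => PySem.Str.isIn "5" p)
  let has_v6 := protocols.any (fun p => PySem.Str.isIn "6" p)
  let framework_only := has_v6 && !has_v5 && !has_v4
  let sdkv2_only := (has_v5 || has_v4) && !has_v6
  let framework_sdkv2 := has_v6 && (has_v5 || has_v4)
  (framework_only, sdkv2_only, framework_sdkv2)

-- ===== PORT B =====
-- B: one fused pass accumulating the three flags, breaking early when all are set.
def dcLoop : List String → Bool → Bool → Bool → Bool × Bool × Bool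
  | [], h4, h5, h6 => (h4, h5, h6)
  | p :: ps, h4, h5, h6 =>
    let h4 := if PySem.Str.isIn "4" p then true else h4
    let h5 := if PySem.Str.isIn "5" p then true else h5
    let h6 := if PySem.Str.isIn "6" p then true else h6
    if h4 && h5 && h6 then (h4, h5, h6) else dcLoop ps h4 h5 h6

def detect_cohort_alt (protocols : List String) : Bool × Bool × Bool :=
  let (h4, h5, h6) := dcLoop protocols false false false
  let framework_only := h6 && !h5 && !h4
  let sdkv2_only := (h5 || h4) && !h6
  let framework_sdkv2 := h6 && (h5 || h4)
  (framework_only, sdkv2_only, framework_sdkv2)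

-- ===== PRECONDITION & SPEC =====
def Spec_detect_cohort (protocols : List String) (out : Bool × Bool × Bool) : Prop := out = detect_cohort_alt protocols
instance (protocols : List String) (out : Bool × Bool × Bool) : Decidable (Spec_detect_cohort protocols out) := by unfold Spec_detect_cohort; infer_instance

-- ===== CLAIM =====
def Claim_equal_detect_cohort : Prop := ∀ (protocols : List String), Dom_detect_cohort protocols → Spec_detect_cohort protocols (detect_cohort protocols)

-- ===== LEMMAS AND PROOFS =====
theorem dcLoop_eq (ps : List String) (h4 h5 h6 : Bool) :
    dcLoop ps h4 h5 h6 =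
      (h4 || ps.any (fun p => PySem.Str.isIn "4" p),
       h5 || ps.any (fun p => PySem.Str.isIn "5" p),
       h6 || ps.any (fun p => PySem.Str.isIn "6" p)) := by
  induction ps generalizing h4 h5 h6 with
  | nil => simp [dcLoop]
  | cons p ps ih =>
    cases h4 <;> cases h5 <;> cases h6 <;>
      cases c4 : PySem.Chars.isIn ['4'] p.toList <;> cases c5 : PySem.Chars.isIn ['5'] p.toList <;>
      cases c6 : PySem.Chars.isIn ['6'] p.toList <;>
      simp [dcLoop, c4, c5, c6, ih]

-- ===== VERDICT =====
theorem detect_cohort_spec : Claim_equal_detect_cohort := by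
  intro protocols _
  unfold Spec_detect_cohort detect_cohort detect_cohort_alt
  rw [dcLoop_eq]
  simp
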